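-- pv_equiv track=rewrite | github.com/ButuzovaMarianna/kib_hw | Compilator.py | map_maker
-- ===== SOURCE A (Python) =====
-- def map_maker(code_func):
--     new_proc_count = True
--     stack = []
--     name = None
--     map_ready_main = {}
--     for el in code_func:
--         if el == ':':
--             new_proc_count = True
--             stack = []
--             name = None
--             continue
--         if new_proc_count:
--             name = el
--             new_proc_count = False
--             continue
--         if not el == ";":
--             stack.append(el)
--         else:
--             stack.append("return")
--             map_ready_main.update({name: stack})
--     return map_ready_main
-- ===== SOURCE B (Python) =====
-- def map_maker(code_func):
--     # Phase 1: split the token stream into segments delimited by ':'.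
--     segments = []
--     cur = []
--     for tok in code_func:
--         if tok == ':':
--             segments.append(cur)
--             cur = []
--         else:
--             cur.append(tok)
--     segments.append(cur)
--     # Phase 2: a segment [name, *body] defines `name` iff body contains ';';
--     # its instruction list is body with every ';' rewritten to 'return'.
--     result = {}
--     for seg in segments:
--         if len(seg) > 1 and ';' in seg[1:]:
--             result[seg[0]] = ['return' if t == ';' else t for t in seg[1:]]
--     return result
-- ===== Notes on version B (the rewrite author's own statement) =====
-- stated objective: simpler
-- what changed: Replaces A's single-pass five-variable state machine (with dict entries aliased to the growing stack list) by a two-phase decomposition: split the token stream on ':' into segments, then insert one dict entry per segment whose body contains ';', rewriting ';' to 'return'.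
import Mathlib
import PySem

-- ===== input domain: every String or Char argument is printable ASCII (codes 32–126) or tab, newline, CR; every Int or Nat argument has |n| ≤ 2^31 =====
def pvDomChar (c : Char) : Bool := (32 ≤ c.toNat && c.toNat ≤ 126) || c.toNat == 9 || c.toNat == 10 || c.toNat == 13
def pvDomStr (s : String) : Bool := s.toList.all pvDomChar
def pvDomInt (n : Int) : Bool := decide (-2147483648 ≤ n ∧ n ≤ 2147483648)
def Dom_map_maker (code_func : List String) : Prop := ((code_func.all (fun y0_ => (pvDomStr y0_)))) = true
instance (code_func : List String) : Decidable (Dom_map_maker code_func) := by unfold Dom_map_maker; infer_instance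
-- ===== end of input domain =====

-- B replaces A's one-pass five-variable state machine by a two-phase decomposition
-- (split on ':' into segments, then one dict insertion per segment); objective: simpler.

-- ===== PORT A =====
-- Python's `map_ready_main.update({name: stack})` stores the SAME list object as `stack`,
-- so later `stack.append` calls mutate the stored entry.  The port models this aliasing
-- exactly with the `stored` flag: while the current segment's stack is stored in the dict,
-- every append to the stack also refreshes the dict entry (hand-ported, exact).
def mmA : List String → Bool → List String → String → Bool →
    PySem.Dict String (List String) → PySem.Dict String (List String)
  | [], _, _, _, _, m => m
  | el :: rest, npc, stack, name, stored, m =>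
    if el = ":" then
      mmA rest true [] "" false m
    else if npc then
      mmA rest false stack el stored m
    else if ¬ el = ";" then
      mmA rest npc (stack ++ [el]) name stored
        (if stored then m.insert name (stack ++ [el]) else m)
    else
      mmA rest npc (stack ++ ["return"]) name true (m.insert name (stack ++ ["return"]))

def map_maker (code_func : List String) : List (String × List String) :=
  (mmA code_func true [] "" false PySem.Dict.empty).items

-- ===== PORT B =====
-- Phase 1 of Source B: split the token stream into segments delimited by ':'.
def splitSegs : List String → List String → List (List String)
  | [], cur => [cur]
  | t :: rest, cur => if t = ":" then cur :: splitSegs rest [] else splitSegs rest (cur ++ [t])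

-- Phase 2 of Source B: a segment [name, *body] defines `name` iff body contains ';'
-- (Source B's `len(seg) > 1 and ';' in seg[1:]`; the nonempty-body part is the `name :: body` pattern).
def segStep (m : PySem.Dict String (List String)) (seg : List String) :
    PySem.Dict String (List String) :=
  match seg with
  | [] => m
  | name :: body =>
    if body.contains ";" then
      m.insert name (body.map (fun t => if t = ";" then "return" else t))
    else m

def map_maker_alt (code_func : List String) : List (String × List String) :=
  ((splitSegs code_func []).foldl segStep PySem.Dict.empty).items

-- ===== PRECONDITION & SPEC =====
def Spec_map_maker (code_func : List String) (out : List (String × List String)) : Prop := out = map_maker_alt code_func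
instance (code_func : List String) (out : List (String × List String)) : Decidable (Spec_map_maker code_func out) := by unfold Spec_map_maker; infer_instance

-- ===== CLAIM (what is proved, stated in full; the proofs are below) =====
def Claim_equal_map_maker : Prop := ∀ (code_func : List String), Dom_map_maker code_func → Spec_map_maker code_func (map_maker code_func)

-- ===== LEMMAS AND PROOFS =====

-- the token rewrite ';' → 'return'
def pvF (t : String) : String := if t = ";" then "return" else t

lemma segStep_cons (m : PySem.Dict String (List String)) (name : String) (body : List String) :
    segStep m (name :: body) =
      if body.contains ";" then m.insert name (body.map pvF) else m := rfl

-- combined invariant: top-of-segment state and mid-segment state of A vs B's segment fold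
lemma mmA_eq_fold : ∀ (toks : List String),
    (∀ m, mmA toks true [] "" false m = (splitSegs toks []).foldl segStep m)
    ∧ (∀ (name : String) (consumed : List String) (m : PySem.Dict String (List String)),
        mmA toks false (consumed.map pvF) name (consumed.contains ";")
          (if consumed.contains ";" then m.insert name (consumed.map pvF) else m)
        = (splitSegs toks (name :: consumed)).foldl segStep m) := by
  intro toks
  induction toks with
  | nil =>
    constructor
    · intro m; simp [mmA, splitSegs, segStep]
    · intro name consumed m
      simp only [mmA, splitSegs, List.foldl, segStep_cons]
  | cons t rest ih =>
    constructor
    · intro m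
      by_cases ht : t = ":"
      · subst ht
        simp only [mmA, splitSegs]
        exact ih.1 m
      · have h2 := ih.2 t [] m
        simp only [List.map_nil, List.contains_nil, Bool.false_eq_true, if_false] at h2
        simp only [mmA, if_neg ht, splitSegs, List.nil_append]
        simpa using h2
    · intro name consumed m
      by_cases ht : t = ":"
      · subst ht
        simp only [mmA, splitSegs]
        exact ih.1 _
      · by_cases hs : t = ";"
        · subst hs
          have h2 := ih.2 name (consumed ++ [";"]) m
          have hc : (consumed ++ [";"]).contains ";" = true := by simp
          have hmap : (consumed ++ [";"]).map pvF = consumed.map pvF ++ ["return"] := by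
            simp [pvF]
          rw [hc, if_pos rfl, hmap] at h2
          have lhs : mmA (";" :: rest) false (consumed.map pvF) name (consumed.contains ";")
              (if consumed.contains ";" then m.insert name (consumed.map pvF) else m)
              = mmA rest false (consumed.map pvF ++ ["return"]) name true
                ((if consumed.contains ";" then m.insert name (consumed.map pvF) else m).insert
                  name (consumed.map pvF ++ ["return"])) := by
            simp [mmA, ht]
          rw [lhs]
          have hins : ((if consumed.contains ";" then m.insert name (consumed.map pvF) else m).insert
              name (consumed.map pvF ++ ["return"]))
              = m.insert name (consumed.map pvF ++ ["return"]) := by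
            split_ifs with h1
            · rw [PySem.Dict.insert_insert_self]
            · rfl
          rw [hins]
          rw [h2]
          have : splitSegs (";" :: rest) (name :: consumed)
              = splitSegs rest (name :: (consumed ++ [";"])) := by
            simp [splitSegs, ht]
          rw [this]
        · -- ordinary token t
          have h2 := ih.2 name (consumed ++ [t]) m
          have hc : (consumed ++ [t]).contains ";" = consumed.contains ";" := by
            cases hcc : consumed.contains ";" <;> simp_all [eq_comm]
          have hmap : (consumed ++ [t]).map pvF = consumed.map pvF ++ [t] := by
            simp [pvF, hs]
          rw [hc, hmap] at h2
          have lhs : mmA (t :: rest) false (consumed.map pvF) name (consumed.contains ";")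
              (if consumed.contains ";" then m.insert name (consumed.map pvF) else m)
              = mmA rest false (consumed.map pvF ++ [t]) name (consumed.contains ";")
                (if consumed.contains ";" then
                  (if consumed.contains ";" then m.insert name (consumed.map pvF) else m).insert
                    name (consumed.map pvF ++ [t])
                 else (if consumed.contains ";" then m.insert name (consumed.map pvF) else m)) := by
            simp [mmA, ht, hs]
          rw [lhs]
          have hins : (if consumed.contains ";" then
              (if consumed.contains ";" then m.insert name (consumed.map pvF) else m).insert
                name (consumed.map pvF ++ [t])
             else (if consumed.contains ";" then m.insert name (consumed.map pvF) else m))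
              = (if consumed.contains ";" then m.insert name (consumed.map pvF ++ [t]) else m) := by
            split_ifs with h1
            · rw [PySem.Dict.insert_insert_self]
            · rfl
          rw [hins, h2]
          have : splitSegs (t :: rest) (name :: consumed)
              = splitSegs rest (name :: (consumed ++ [t])) := by
            simp [splitSegs, ht]
          rw [this]

-- ===== VERDICT (by name: the statement is the Claim_ definition above) =====
theorem map_maker_spec : Claim_equal_map_maker := by
  intro code_func _
  unfold Spec_map_maker map_maker map_maker_alt
  rw [(mmA_eq_fold code_func).1]
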